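-- pv_equiv track=rewrite | github.com/krArrow/AI-learning-buddy | src/tools/course_search.py | extract_resource_type
-- ===== SOURCE A (Python) =====
-- def extract_resource_type(title: str, url: str, content: str = "") -> str:
--     """
--     Infer resource type from URL, title, and content.
--
--     Args:
--         title: Resource title
--         url: Resource URL
--         content: Resource content/description
--
--     Returns:
--         Resource type string
--     """
--     url_lower = url.lower()
--     title_lower = title.lower()
--     content_lower = content.lower()
--
--     # Check URL patterns
--     if "youtube.com" in url_lower or "youtu.be" in url_lower:
--         return "video"
--     elif "udemy.com" in url_lower or "udacity.com" in url_lower or "coursera.org" in url_lower: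
--         return "course"
--     elif "github.com" in url_lower:
--         return "project"
--     elif "dev.to" in url_lower or "medium.com" in url_lower or "hashnode.com" in url_lower:
--         return "article"
--     elif "docs." in url_lower or "documentation" in url_lower or ".io" in url_lower:
--         return "tutorial"
--
--     # Check title/content patterns
--     if any(word in title_lower for word in ["tutorial", "guide", "how to", "learn"]):
--         return "tutorial"
--     elif any(word in title_lower for word in ["video", "playlist", "channel"]):
--         return "video"
--     elif any(word in title_lower for word in ["course", "class", "lesson"]):
--         return "course"
--     elif any(word in title_lower for word in ["project", "example", "sample"]):
--         return "project"
--     elif any(word in content_lower for word in ["interactive", "hands-on", "practice"]):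
--         return "interactive"
--
--     # Default
--     return "article"
-- ===== SOURCE B (Python) =====
-- # Exhaustive scoring instead of a cascade: scan a flat per-pattern rule list,
-- # keep the smallest matching priority, decode it through a type table.
-- TYPES = ["video", "course", "project", "article", "tutorial",
--          "tutorial", "video", "course", "project", "interactive", "article"]
--
-- # (pattern, field index, priority); field 0 = url, 1 = title, 2 = content
-- RULES = [
--     ("youtube.com", 0, 0), ("youtu.be", 0, 0),
--     ("udemy.com", 0, 1), ("udacity.com", 0, 1), ("coursera.org", 0, 1),
--     ("github.com", 0, 2),
--     ("dev.to", 0, 3), ("medium.com", 0, 3), ("hashnode.com", 0, 3),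
--     ("docs.", 0, 4), ("documentation", 0, 4), (".io", 0, 4),
--     ("tutorial", 1, 5), ("guide", 1, 5), ("how to", 1, 5), ("learn", 1, 5),
--     ("video", 1, 6), ("playlist", 1, 6), ("channel", 1, 6),
--     ("course", 1, 7), ("class", 1, 7), ("lesson", 1, 7),
--     ("project", 1, 8), ("example", 1, 8), ("sample", 1, 8),
--     ("interactive", 2, 9), ("hands-on", 2, 9), ("practice", 2, 9),
-- ]
--
--
-- def extract_resource_type(title: str, url: str, content: str = "") -> str:
--     fields = (url.lower(), title.lower(), content.lower())
--     best = len(TYPES) - 1  # sentinel priority: decodes to the default "article"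
--     for pat, fld, prio in RULES:
--         if prio < best and pat in fields[fld]:
--             best = prio
--     return TYPES[best]
-- ===== Notes on version B (the rewrite author's own statement) =====
-- stated objective: alternative
-- what changed: Replaced the short-circuiting if/elif cascade by exhaustive scoring: a single pass over a flat per-pattern rule list keeps the minimal matching priority, which is then decoded through a type table (no early exit, no tiered branches).
import Mathlib
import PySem

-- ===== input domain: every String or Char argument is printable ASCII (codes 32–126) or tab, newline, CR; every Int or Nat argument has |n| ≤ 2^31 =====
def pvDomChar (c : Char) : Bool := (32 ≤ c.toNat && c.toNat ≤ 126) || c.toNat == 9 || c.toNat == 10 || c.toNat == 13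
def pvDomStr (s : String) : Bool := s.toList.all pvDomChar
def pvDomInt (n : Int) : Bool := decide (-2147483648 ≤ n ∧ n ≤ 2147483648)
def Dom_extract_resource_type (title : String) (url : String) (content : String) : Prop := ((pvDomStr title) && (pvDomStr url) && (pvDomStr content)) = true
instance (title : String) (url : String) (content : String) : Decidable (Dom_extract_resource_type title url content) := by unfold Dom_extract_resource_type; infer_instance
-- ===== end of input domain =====

-- B replaces A's short-circuiting cascade by exhaustive scoring: one pass over a flat
-- per-pattern rule list keeps the minimal matching priority, decoded via a type table.

-- ===== PORT A =====
def extract_resource_type (title : String) (url : String) (content : String) : String :=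
  let url_lower := PySem.Str.lower url
  let title_lower := PySem.Str.lower title
  let content_lower := PySem.Str.lower content
  if PySem.Str.isIn "youtube.com" url_lower || PySem.Str.isIn "youtu.be" url_lower then "video"
  else if PySem.Str.isIn "udemy.com" url_lower || PySem.Str.isIn "udacity.com" url_lower || PySem.Str.isIn "coursera.org" url_lower then "course"
  else if PySem.Str.isIn "github.com" url_lower then "project"
  else if PySem.Str.isIn "dev.to" url_lower || PySem.Str.isIn "medium.com" url_lower || PySem.Str.isIn "hashnode.com" url_lower then "article"
  else if PySem.Str.isIn "docs." url_lower || PySem.Str.isIn "documentation" url_lower || PySem.Str.isIn ".io" url_lower then "tutorial"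
  else if ["tutorial", "guide", "how to", "learn"].any (fun w => PySem.Str.isIn w title_lower) then "tutorial"
  else if ["video", "playlist", "channel"].any (fun w => PySem.Str.isIn w title_lower) then "video"
  else if ["course", "class", "lesson"].any (fun w => PySem.Str.isIn w title_lower) then "course"
  else if ["project", "example", "sample"].any (fun w => PySem.Str.isIn w title_lower) then "project"
  else if ["interactive", "hands-on", "practice"].any (fun w => PySem.Str.isIn w content_lower) then "interactive"
  else "article"

-- ===== PORT B =====
-- Source B's decode table TYPES (priority -> resource type; index 10 is the default)
def pvTypes : List String :=
  ["video", "course", "project", "article", "tutorial",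
   "tutorial", "video", "course", "project", "interactive", "article"]

-- Source B's flat rule list RULES: (pattern, field index, priority); field 0 = url, 1 = title, 2 = content
def pvRules : List (String × Int × Int) :=
  [ ("youtube.com", 0, 0),
    ("youtu.be", 0, 0),
    ("udemy.com", 0, 1),
    ("udacity.com", 0, 1),
    ("coursera.org", 0, 1),
    ("github.com", 0, 2),
    ("dev.to", 0, 3),
    ("medium.com", 0, 3),
    ("hashnode.com", 0, 3),
    ("docs.", 0, 4),
    ("documentation", 0, 4),
    (".io", 0, 4),
    ("tutorial", 1, 5),
    ("guide", 1, 5),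
    ("how to", 1, 5),
    ("learn", 1, 5),
    ("video", 1, 6),
    ("playlist", 1, 6),
    ("channel", 1, 6),
    ("course", 1, 7),
    ("class", 1, 7),
    ("lesson", 1, 7),
    ("project", 1, 8),
    ("example", 1, 8),
    ("sample", 1, 8),
    ("interactive", 2, 9),
    ("hands-on", 2, 9),
    ("practice", 2, 9) ]

def extract_resource_type_alt (title : String) (url : String) (content : String) : String :=
  let fields := (PySem.Str.lower url, PySem.Str.lower title, PySem.Str.lower content)
  -- the for-loop accumulating the minimal matching priority (starts at len(TYPES)-1 = 10)
  let best : Int := pvRules.foldl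
    (fun best r =>
      -- fields[fld]: fld is always the literal 0, 1 or 2, so tuple indexing is exact here
      let hay := if r.2.1 == 0 then fields.1 else if r.2.1 == 1 then fields.2.1 else fields.2.2
      if decide (r.2.2 < best) && PySem.Str.isIn r.1 hay then r.2.2 else best)
    ((pvTypes.length : Int) - 1)
  -- TYPES[best]: best is always in [0, 10], so the index is in range
  (PySem.List.pyGet? pvTypes best).getD "article"

-- ===== PRECONDITION & SPEC =====
def Spec_extract_resource_type (title : String) (url : String) (content : String) (out : String) : Prop := out = extract_resource_type_alt title url content
instance (title : String) (url : String) (content : String) (out : String) : Decidable (Spec_extract_resource_type title url content out) := by unfold Spec_extract_resource_type; infer_instance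

-- ===== CLAIM =====
def Claim_equal_extract_resource_type : Prop := ∀ (title : String) (url : String) (content : String), Dom_extract_resource_type title url content → Spec_extract_resource_type title url content (extract_resource_type title url content)

-- ===== LEMMAS AND PROOFS =====

-- ===== VERDICT =====
theorem extract_resource_type_spec : Claim_equal_extract_resource_type := by
  intro title url content _
  unfold Spec_extract_resource_type
  by_cases h1 : PySem.Str.isIn "youtube.com" (PySem.Str.lower url) = true
  · simp at h1
    simp [extract_resource_type, extract_resource_type_alt, pvRules, pvTypes, PySem.List.pyGet?, PySem.List.pyIdx?, h1]
  simp at h1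
  by_cases h2 : PySem.Str.isIn "youtu.be" (PySem.Str.lower url) = true
  · simp at h2
    simp [extract_resource_type, extract_resource_type_alt, pvRules, pvTypes, PySem.List.pyGet?, PySem.List.pyIdx?, h1, h2]
  simp at h2
  by_cases h3 : PySem.Str.isIn "udemy.com" (PySem.Str.lower url) = true
  · simp at h3
    simp [extract_resource_type, extract_resource_type_alt, pvRules, pvTypes, PySem.List.pyGet?, PySem.List.pyIdx?, h1, h2, h3]
  simp at h3
  by_cases h4 : PySem.Str.isIn "udacity.com" (PySem.Str.lower url) = true
  · simp at h4
    simp [extract_resource_type, extract_resource_type_alt, pvRules, pvTypes, PySem.List.pyGet?, PySem.List.pyIdx?, h1, h2, h3, h4]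
  simp at h4
  by_cases h5 : PySem.Str.isIn "coursera.org" (PySem.Str.lower url) = true
  · simp at h5
    simp [extract_resource_type, extract_resource_type_alt, pvRules, pvTypes, PySem.List.pyGet?, PySem.List.pyIdx?, h1, h2, h3, h4, h5]
  simp at h5
  by_cases h6 : PySem.Str.isIn "github.com" (PySem.Str.lower url) = true
  · simp at h6
    simp [extract_resource_type, extract_resource_type_alt, pvRules, pvTypes, PySem.List.pyGet?, PySem.List.pyIdx?, h1, h2, h3, h4, h5, h6]
  simp at h6
  by_cases h7 : PySem.Str.isIn "dev.to" (PySem.Str.lower url) = true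
  · simp at h7
    simp [extract_resource_type, extract_resource_type_alt, pvRules, pvTypes, PySem.List.pyGet?, PySem.List.pyIdx?, h1, h2, h3, h4, h5, h6, h7]
  simp at h7
  by_cases h8 : PySem.Str.isIn "medium.com" (PySem.Str.lower url) = true
  · simp at h8
    simp [extract_resource_type, extract_resource_type_alt, pvRules, pvTypes, PySem.List.pyGet?, PySem.List.pyIdx?, h1, h2, h3, h4, h5, h6, h7, h8]
  simp at h8
  by_cases h9 : PySem.Str.isIn "hashnode.com" (PySem.Str.lower url) = true
  · simp at h9
    simp [extract_resource_type, extract_resource_type_alt, pvRules, pvTypes, PySem.List.pyGet?, PySem.List.pyIdx?, h1, h2, h3, h4, h5, h6, h7, h8, h9]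
  simp at h9
  by_cases h10 : PySem.Str.isIn "docs." (PySem.Str.lower url) = true
  · simp at h10
    simp [extract_resource_type, extract_resource_type_alt, pvRules, pvTypes, PySem.List.pyGet?, PySem.List.pyIdx?, h1, h2, h3, h4, h5, h6, h7, h8, h9, h10]
  simp at h10
  by_cases h11 : PySem.Str.isIn "documentation" (PySem.Str.lower url) = true
  · simp at h11
    simp [extract_resource_type, extract_resource_type_alt, pvRules, pvTypes, PySem.List.pyGet?, PySem.List.pyIdx?, h1, h2, h3, h4, h5, h6, h7, h8, h9, h10, h11]
  simp at h11
  by_cases h12 : PySem.Str.isIn ".io" (PySem.Str.lower url) = true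
  · simp at h12
    simp [extract_resource_type, extract_resource_type_alt, pvRules, pvTypes, PySem.List.pyGet?, PySem.List.pyIdx?, h1, h2, h3, h4, h5, h6, h7, h8, h9, h10, h11, h12]
  simp at h12
  by_cases h13 : PySem.Str.isIn "tutorial" (PySem.Str.lower title) = true
  · simp at h13
    simp [extract_resource_type, extract_resource_type_alt, pvRules, pvTypes, PySem.List.pyGet?, PySem.List.pyIdx?, h1, h2, h3, h4, h5, h6, h7, h8, h9, h10, h11, h12, h13]
  simp at h13
  by_cases h14 : PySem.Str.isIn "guide" (PySem.Str.lower title) = true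
  · simp at h14
    simp [extract_resource_type, extract_resource_type_alt, pvRules, pvTypes, PySem.List.pyGet?, PySem.List.pyIdx?, h1, h2, h3, h4, h5, h6, h7, h8, h9, h10, h11, h12, h13, h14]
  simp at h14
  by_cases h15 : PySem.Str.isIn "how to" (PySem.Str.lower title) = true
  · simp at h15
    simp [extract_resource_type, extract_resource_type_alt, pvRules, pvTypes, PySem.List.pyGet?, PySem.List.pyIdx?, h1, h2, h3, h4, h5, h6, h7, h8, h9, h10, h11, h12, h13, h14, h15]
  simp at h15
  by_cases h16 : PySem.Str.isIn "learn" (PySem.Str.lower title) = true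
  · simp at h16
    simp [extract_resource_type, extract_resource_type_alt, pvRules, pvTypes, PySem.List.pyGet?, PySem.List.pyIdx?, h1, h2, h3, h4, h5, h6, h7, h8, h9, h10, h11, h12, h13, h14, h15, h16]
  simp at h16
  by_cases h17 : PySem.Str.isIn "video" (PySem.Str.lower title) = true
  · simp at h17
    simp [extract_resource_type, extract_resource_type_alt, pvRules, pvTypes, PySem.List.pyGet?, PySem.List.pyIdx?, h1, h2, h3, h4, h5, h6, h7, h8, h9, h10, h11, h12, h13, h14, h15, h16, h17]
  simp at h17
  by_cases h18 : PySem.Str.isIn "playlist" (PySem.Str.lower title) = true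
  · simp at h18
    simp [extract_resource_type, extract_resource_type_alt, pvRules, pvTypes, PySem.List.pyGet?, PySem.List.pyIdx?, h1, h2, h3, h4, h5, h6, h7, h8, h9, h10, h11, h12, h13, h14, h15, h16, h17, h18]
  simp at h18
  by_cases h19 : PySem.Str.isIn "channel" (PySem.Str.lower title) = true
  · simp at h19
    simp [extract_resource_type, extract_resource_type_alt, pvRules, pvTypes, PySem.List.pyGet?, PySem.List.pyIdx?, h1, h2, h3, h4, h5, h6, h7, h8, h9, h10, h11, h12, h13, h14, h15, h16, h17, h18, h19]
  simp at h19
  by_cases h20 : PySem.Str.isIn "course" (PySem.Str.lower title) = true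
  · simp at h20
    simp [extract_resource_type, extract_resource_type_alt, pvRules, pvTypes, PySem.List.pyGet?, PySem.List.pyIdx?, h1, h2, h3, h4, h5, h6, h7, h8, h9, h10, h11, h12, h13, h14, h15, h16, h17, h18, h19, h20]
  simp at h20
  by_cases h21 : PySem.Str.isIn "class" (PySem.Str.lower title) = true
  · simp at h21
    simp [extract_resource_type, extract_resource_type_alt, pvRules, pvTypes, PySem.List.pyGet?, PySem.List.pyIdx?, h1, h2, h3, h4, h5, h6, h7, h8, h9, h10, h11, h12, h13, h14, h15, h16, h17, h18, h19, h20, h21]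
  simp at h21
  by_cases h22 : PySem.Str.isIn "lesson" (PySem.Str.lower title) = true
  · simp at h22
    simp [extract_resource_type, extract_resource_type_alt, pvRules, pvTypes, PySem.List.pyGet?, PySem.List.pyIdx?, h1, h2, h3, h4, h5, h6, h7, h8, h9, h10, h11, h12, h13, h14, h15, h16, h17, h18, h19, h20, h21, h22]
  simp at h22
  by_cases h23 : PySem.Str.isIn "project" (PySem.Str.lower title) = true
  · simp at h23
    simp [extract_resource_type, extract_resource_type_alt, pvRules, pvTypes, PySem.List.pyGet?, PySem.List.pyIdx?, h1, h2, h3, h4, h5, h6, h7, h8, h9, h10, h11, h12, h13, h14, h15, h16, h17, h18, h19, h20, h21, h22, h23]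
  simp at h23
  by_cases h24 : PySem.Str.isIn "example" (PySem.Str.lower title) = true
  · simp at h24
    simp [extract_resource_type, extract_resource_type_alt, pvRules, pvTypes, PySem.List.pyGet?, PySem.List.pyIdx?, h1, h2, h3, h4, h5, h6, h7, h8, h9, h10, h11, h12, h13, h14, h15, h16, h17, h18, h19, h20, h21, h22, h23, h24]
  simp at h24
  by_cases h25 : PySem.Str.isIn "sample" (PySem.Str.lower title) = true
  · simp at h25
    simp [extract_resource_type, extract_resource_type_alt, pvRules, pvTypes, PySem.List.pyGet?, PySem.List.pyIdx?, h1, h2, h3, h4, h5, h6, h7, h8, h9, h10, h11, h12, h13, h14, h15, h16, h17, h18, h19, h20, h21, h22, h23, h24, h25]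
  simp at h25
  by_cases h26 : PySem.Str.isIn "interactive" (PySem.Str.lower content) = true
  · simp at h26
    simp [extract_resource_type, extract_resource_type_alt, pvRules, pvTypes, PySem.List.pyGet?, PySem.List.pyIdx?, h1, h2, h3, h4, h5, h6, h7, h8, h9, h10, h11, h12, h13, h14, h15, h16, h17, h18, h19, h20, h21, h22, h23, h24, h25, h26]
  simp at h26
  by_cases h27 : PySem.Str.isIn "hands-on" (PySem.Str.lower content) = true
  · simp at h27
    simp [extract_resource_type, extract_resource_type_alt, pvRules, pvTypes, PySem.List.pyGet?, PySem.List.pyIdx?, h1, h2, h3, h4, h5, h6, h7, h8, h9, h10, h11, h12, h13, h14, h15, h16, h17, h18, h19, h20, h21, h22, h23, h24, h25, h26, h27]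
  simp at h27
  by_cases h28 : PySem.Str.isIn "practice" (PySem.Str.lower content) = true
  · simp at h28
    simp [extract_resource_type, extract_resource_type_alt, pvRules, pvTypes, PySem.List.pyGet?, PySem.List.pyIdx?, h1, h2, h3, h4, h5, h6, h7, h8, h9, h10, h11, h12, h13, h14, h15, h16, h17, h18, h19, h20, h21, h22, h23, h24, h25, h26, h27, h28]
  simp at h28
  simp [extract_resource_type, extract_resource_type_alt, pvRules, pvTypes, PySem.List.pyGet?, PySem.List.pyIdx?, h1, h2, h3, h4, h5, h6, h7, h8, h9, h10, h11, h12, h13, h14, h15, h16, h17, h18, h19, h20, h21, h22, h23, h24, h25, h26, h27, h28]
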